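-- pv_equiv track=rewrite | github.com/smicho01/python-algorithms | Arrays/03_min_sum_of_change.py | changeICantGiveBack
-- ===== SOURCE A (Python) =====
-- def changeICantGiveBack(coins):
--     coins.sort()
--     currentChange = 0
--     for coin in coins:
--         if coin > currentChange + 1:
--             return currentChange + 1
--         currentChange += coin
--     return currentChange + 1
-- ===== SOURCE B (Python) =====
-- def changeICantGiveBack(coins):
--     coins.sort()
--     # pass 1: table of running prefix sums (prefixes[i] = sum of coins[:i])
--     prefixes = [0]
--     for c in coins:
--         prefixes.append(prefixes[-1] + c)
--     # pass 2: first position whose coin exceeds the reachable range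
--     for i, c in enumerate(coins):
--         if c > prefixes[i] + 1:
--             return prefixes[i] + 1
--     return prefixes[-1] + 1
-- ===== Notes on version B (the rewrite author's own statement) =====
-- stated objective: alternative
-- what changed: A's single fused early-exit accumulator loop is replaced by a two-pass decomposition: first build the table of prefix sums of the sorted coins, then scan for the first coin exceeding its preceding prefix sum + 1.
import Mathlib
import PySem

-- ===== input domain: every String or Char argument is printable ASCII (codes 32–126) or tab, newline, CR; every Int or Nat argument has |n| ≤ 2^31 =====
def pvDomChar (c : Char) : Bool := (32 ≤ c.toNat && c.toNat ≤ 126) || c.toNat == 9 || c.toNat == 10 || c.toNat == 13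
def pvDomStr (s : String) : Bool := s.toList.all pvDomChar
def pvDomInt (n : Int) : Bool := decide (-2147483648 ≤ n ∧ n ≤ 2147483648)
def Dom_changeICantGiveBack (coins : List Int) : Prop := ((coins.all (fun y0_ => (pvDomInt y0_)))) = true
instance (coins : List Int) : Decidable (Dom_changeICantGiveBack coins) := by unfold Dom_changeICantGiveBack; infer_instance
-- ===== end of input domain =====

-- ===== PORT A =====
-- loop of A: fused early-exit accumulator over the sorted coins
def pvLoopA : List Int → Int → Int
  | [], cur => cur + 1
  | c :: rest, cur => if c > cur + 1 then cur + 1 else pvLoopA rest (cur + c)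

-- Equivalence is about the RETURN value; Python A sorts `coins` in place (B does the same).
def changeICantGiveBack (coins : List Int) : Int :=
  pvLoopA (PySem.List.sorted coins (fun x => x) false) 0

-- ===== PORT B =====
-- pass 1 of B: table of running prefix sums (head = accumulator so far)
def pvScanSums : List Int → Int → List Int
  | [], acc => [acc]
  | c :: rest, acc => acc :: pvScanSums rest (acc + c)

-- pass 2 of B: first (coin, prefix-before-it) pair violating reachability
def pvFindViol : List (Int × Int) → Int → Int
  | [], total => total + 1
  | (c, p) :: rest, total => if c > p + 1 then p + 1 else pvFindViol rest total

def changeICantGiveBack_alt (coins : List Int) : Int :=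
  let s := PySem.List.sorted coins (fun x => x) false
  let prefixes := pvScanSums s 0
  pvFindViol (s.zip prefixes) (prefixes.getLastD 0)

-- ===== PRECONDITION & SPEC =====
def Spec_changeICantGiveBack (coins : List Int) (out : Int) : Prop := out = changeICantGiveBack_alt coins
instance (coins : List Int) (out : Int) : Decidable (Spec_changeICantGiveBack coins out) := by unfold Spec_changeICantGiveBack; infer_instance

-- ===== CLAIM (what is proved, stated in full; the proofs are below) =====
def Claim_equal_changeICantGiveBack : Prop := ∀ (coins : List Int), Dom_changeICantGiveBack coins → Spec_changeICantGiveBack coins (changeICantGiveBack coins)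

-- ===== LEMMAS AND PROOFS =====
theorem pvScanSums_cons (l : List Int) (a : Int) :
    ∃ t, pvScanSums l a = a :: t := by
  cases l <;> simp [pvScanSums]

theorem pvLoop_eq (l : List Int) (cur : Int) :
    pvLoopA l cur
      = pvFindViol (l.zip (pvScanSums l cur)) ((pvScanSums l cur).getLastD 0) := by
  induction l generalizing cur with
  | nil => simp [pvLoopA, pvScanSums, pvFindViol]
  | cons c rest ih =>
    simp only [pvLoopA, pvScanSums, List.zip_cons_cons, pvFindViol]
    split
    · rfl
    · obtain ⟨t, ht⟩ := pvScanSums_cons rest (cur + c)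
      rw [ih (cur + c)]
      congr 1
      simp only [List.getLastD_cons, ht]

-- ===== VERDICT (by name: the statement is the Claim_ definition above) =====
theorem changeICantGiveBack_spec : Claim_equal_changeICantGiveBack := by
  intro coins _
  unfold Spec_changeICantGiveBack changeICantGiveBack changeICantGiveBack_alt
  exact pvLoop_eq _ 0
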